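-- pv_equiv track=rewrite | github.com/souliane/teatree | src/teetree/skill_map.py | parse_skill_delegation_map
-- ===== SOURCE A (Python) =====
-- def parse_skill_delegation_map(markdown: str) -> dict[str, list[str]]:
--     mapping: dict[str, list[str]] = {}
--     current_phase = ""
--     for raw_line in markdown.splitlines():
--         line = raw_line.strip()
--         if line.startswith("## "):
--             current_phase = line.removeprefix("## ").strip()
--             mapping[current_phase] = []
--             continue
--         if line.startswith("- ") and current_phase:
--             mapping[current_phase].append(line.removeprefix("- ").strip())
--     return mapping
-- ===== SOURCE B (Python) =====
-- def parse_skill_delegation_map(markdown: str) -> dict[str, list[str]]: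
--     # Single reverse scan: collect items into a bucket and emit one (phase, items)
--     # pair per header; the final bucket (lines above the first header) is dropped.
--     pairs = []
--     bucket = []
--     for raw_line in reversed(markdown.splitlines()):
--         line = raw_line.strip()
--         if line.startswith("## "):
--             pairs.append((line.removeprefix("## ").strip(), list(reversed(bucket))))
--             bucket = []
--         elif line.startswith("- "):
--             bucket.append(line.removeprefix("- ").strip())
--     mapping: dict[str, list[str]] = {}
--     for phase, items in reversed(pairs):
--         mapping[phase] = items
--     return mapping
-- ===== Notes on version B (the rewrite author's own statement) =====
-- stated objective: alternative
-- what changed: A walks the lines forward keeping a current_phase state and mutating the dict entry item-by-item; B makes one reverse scan that buckets items and emits a complete (phase, items) pair at each header (lines above the first header fall into a discarded bucket), then builds the dict from the reversed pair list so a repeated phase is overwritten exactly as in A.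
import Mathlib
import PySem

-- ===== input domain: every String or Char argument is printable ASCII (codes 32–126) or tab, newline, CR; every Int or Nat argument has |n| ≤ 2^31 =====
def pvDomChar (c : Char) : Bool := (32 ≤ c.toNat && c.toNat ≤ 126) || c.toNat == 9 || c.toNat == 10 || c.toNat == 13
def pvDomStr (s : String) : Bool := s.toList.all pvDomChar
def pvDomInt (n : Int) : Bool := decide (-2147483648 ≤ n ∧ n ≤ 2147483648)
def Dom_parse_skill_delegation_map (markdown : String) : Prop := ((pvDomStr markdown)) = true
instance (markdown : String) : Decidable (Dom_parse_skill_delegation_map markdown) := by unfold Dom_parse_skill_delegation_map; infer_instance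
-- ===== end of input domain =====

-- B replaces A's forward scan with mutable current_phase state by one reverse scan that
-- emits a complete (phase, items) pair per header; return values proved equal (alternative).

-- Python str.removeprefix(p): drop p iff it is a prefix (exact port, no PySem primitive)
def pyRemoveprefix (s p : String) : String :=
  if PySem.Str.startswith s p then String.ofList (s.toList.drop p.toList.length) else s

-- tests line.startswith("## ") / line.startswith("- ") on a stripped line
def pvH (line : String) : Bool := PySem.Str.startswith line "## "
def pvI (line : String) : Bool := PySem.Str.startswith line "- "

-- phase name of a (stripped) header line: line.removeprefix("## ").strip()
def pvName (line : String) : String := PySem.Str.strip (pyRemoveprefix line "## ")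
-- item text of a (stripped) "- " line: line.removeprefix("- ").strip()
def pvItem (line : String) : String := PySem.Str.strip (pyRemoveprefix line "- ")

-- ===== PORT A =====
-- A's loop body, applied to the stripped line
def pvStepA (st : PySem.Dict String (List String) × String) (line : String) :
    PySem.Dict String (List String) × String :=
  if pvH line then
    (st.1.insert (pvName line) [], pvName line)
  else if pvI line && st.2 != "" then
    -- mapping[current_phase].append(..): the key is always present (set at its header),
    -- so this is exactly d[k] = d[k] + [item]
    (st.1.modify st.2 [] (fun v => v ++ [pvItem line]), st.2)
  else st

def parse_skill_delegation_map (markdown : String) : List (String × List String) :=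
  (((PySem.Str.splitlines markdown).foldl
      (fun st raw_line => pvStepA st (PySem.Str.strip raw_line))
      (PySem.Dict.empty, "")).1).items

-- ===== PORT B =====
-- B's reverse-scan body, applied to the stripped line: bucket items, flush at a header
def pvStepB (st : List String × List (String × List String)) (line : String) :
    List String × List (String × List String) :=
  if pvH line then
    ([], st.2 ++ [(pvName line, st.1.reverse)])
  else if pvI line then
    (st.1 ++ [pvItem line], st.2)
  else st

def parse_skill_delegation_map_alt (markdown : String) : List (String × List String) :=
  let scanned := (PySem.Str.splitlines markdown).reverse.foldl
      (fun st raw_line => pvStepB st (PySem.Str.strip raw_line)) ([], [])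
  (scanned.2.reverse.foldl
      (fun (m : PySem.Dict String (List String)) pr => m.insert pr.1 pr.2)
      PySem.Dict.empty).items

-- ===== PRECONDITION & SPEC =====
def Spec_parse_skill_delegation_map (markdown : String) (out : List (String × List String)) : Prop := out = parse_skill_delegation_map_alt markdown
instance (markdown : String) (out : List (String × List String)) : Decidable (Spec_parse_skill_delegation_map markdown out) := by unfold Spec_parse_skill_delegation_map; infer_instance

-- ===== CLAIM (what is proved, stated in full; the proofs are below) =====
def Claim_equal_parse_skill_delegation_map : Prop := ∀ (markdown : String), Dom_parse_skill_delegation_map markdown → Spec_parse_skill_delegation_map markdown (parse_skill_delegation_map markdown)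

-- ===== LEMMAS AND PROOFS =====

-- "not a header" predicate on a stripped line
def pvNH (line : String) : Bool := !pvH line

-- items of a section body
def pvItems (body : List String) : List String :=
  (body.filter (fun l => pvI l)).map pvItem

-- the (phase, items) pairs of the sections, in document order
def pvSecs : List String → List (String × List String)
  | [] => []
  | l :: ls =>
    if pvH l then
      (pvName l, pvItems (ls.takeWhile pvNH)) :: pvSecs (ls.dropWhile pvNH)
    else pvSecs ls
termination_by ls => ls.length
decreasing_by
  · have := List.length_dropWhile_le pvNH ls; simpa using Nat.lt_succ_of_le this
  · simp

def pvInsAll (m : PySem.Dict String (List String)) (prs : List (String × List String)) :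
    PySem.Dict String (List String) :=
  prs.foldl (fun m pr => m.insert pr.1 pr.2) m

theorem pvSecs_dropWhile (ls : List String) : pvSecs (ls.dropWhile pvNH) = pvSecs ls := by
  induction ls with
  | nil => simp
  | cons l ls ih =>
    by_cases h : pvH l = true
    · simp [pvNH, h]
    · simp only [pvSecs, h]
      simpa [pvNH, h] using ih

theorem pv_insert_insert {d : PySem.Dict String (List String)} {k : String}
    {v w : List String} : (d.insert k v).insert k w = d.insert k w := by
  apply PySem.Dict.ext
  by_cases hc : d.contains k = true
  · rw [PySem.Dict.items_insert_of_contains _ w (PySem.Dict.contains_insert_self d k v),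
        PySem.Dict.items_insert_of_contains _ v hc,
        PySem.Dict.items_insert_of_contains _ w hc, List.map_map]
    apply List.map_congr_left
    intro p _
    by_cases hp : p.1 = k <;> simp [hp]
  · rw [PySem.Dict.items_insert_of_contains _ w (PySem.Dict.contains_insert_self d k v),
        PySem.Dict.items_insert_of_not_contains _ v (by simpa using hc),
        PySem.Dict.items_insert_of_not_contains _ w (by simpa using hc),
        List.map_append]
    have hmem : ∀ p ∈ d.items, ¬ p.1 = k := by
      intro p hp hk
      have hin : p.1 ∈ d.keys := by
        simp [PySem.Dict.keys]
        exact ⟨p.2, by simpa using hp⟩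
      exact hc ((PySem.Dict.contains_iff_mem_keys d k).2 (hk ▸ hin))
    have hid : List.map (fun p => if (p.1 == k) = true then (k, w) else p) d.items
        = List.map id d.items :=
      List.map_congr_left (fun p hp => by simp [hmem p hp])
    simp only [List.map_cons, List.map_nil, hid, List.map_id]
    simp

theorem pv_insert_getD_self {d : PySem.Dict String (List String)} {k : String}
    (hn : d.keys.Nodup) (hc : d.contains k = true) (dflt : List String) :
    d.insert k (d.getD k dflt) = d := by
  apply PySem.Dict.ext
  rw [PySem.Dict.items_insert_of_contains _ _ hc]
  conv_rhs => rw [← List.map_id d.items]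
  apply List.map_congr_left
  rintro ⟨a, b⟩ hp
  by_cases hb : a = k
  · subst hb
    have hget : d.get? a = some b := PySem.Dict.get?_of_mem_items d hp hn
    simp [PySem.Dict.getD_eq_get?_getD, hget]
  · simp [hb]

-- a stripped header line has a nonempty phase name (a stripped line cannot end in a space)
theorem pv_strip_ne_nil {t : List Char} {c : Char} (hc : c ∈ t)
    (hs : PySem.Chars.isspace c = false) : PySem.Chars.strip t ≠ [] := by
  simp only [PySem.Chars.strip, PySem.Chars.rstrip, PySem.Chars.lstrip]
  intro h
  rw [List.reverse_eq_nil_iff, List.dropWhile_eq_nil_iff] at h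
  have h1 : List.dropWhile PySem.Chars.isspace t ≠ [] := by
    rw [Ne, List.dropWhile_eq_nil_iff]
    intro hall
    rw [hall c hc] at hs; cases hs
  have hh := List.head_dropWhile_not PySem.Chars.isspace h1
  have hm := h _ (by rw [List.mem_reverse]; exact List.head_mem h1)
  rw [hh] at hm; cases hm

theorem pv_strip_getLast? (x : List Char) (c : Char)
    (h : (PySem.Chars.strip x).getLast? = some c) : PySem.Chars.isspace c = false := by
  rw [PySem.Chars.strip, PySem.Chars.rstrip, List.getLast?_reverse] at h
  have hne : List.dropWhile PySem.Chars.isspace (PySem.Chars.lstrip x).reverse ≠ [] := by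
    intro h0; rw [h0] at h; cases h
  rw [List.head?_eq_some_head hne] at h
  have hw := List.head_dropWhile_not PySem.Chars.isspace hne
  rw [Option.some_inj.1 h] at hw
  exact hw

theorem pvName_ne_empty (r : String)
    (h : pvH (PySem.Str.strip r) = true) :
    pvName (PySem.Str.strip r) ≠ "" := by
  have hsw : PySem.Str.startswith (PySem.Str.strip r) "## " = true := h
  have hpre : ['#', '#', ' '] <+: PySem.Chars.strip r.toList := by
    have h2 := hsw
    rw [PySem.Str.startswith_eq, PySem.Str.toList_strip] at h2
    exact (PySem.Chars.startswith_iff _ _).1 h2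
  obtain ⟨t, ht⟩ := hpre
  have htne : t ≠ [] := by
    intro h0
    rw [h0, List.append_nil] at ht
    have h1 : (PySem.Chars.strip r.toList).getLast? = some ' ' := by rw [← ht]; rfl
    have h2 := pv_strip_getLast? _ _ h1
    exact absurd h2 (by decide)
  obtain ⟨c, hc⟩ := Option.isSome_iff_exists.1 (List.getLast?_isSome.2 htne)
  have hcu : (PySem.Chars.strip r.toList).getLast? = some c := by
    rw [← ht, List.getLast?_append_of_ne_nil _ htne]; exact hc
  have hcs := pv_strip_getLast? _ _ hcu
  have hne := pv_strip_ne_nil (List.mem_of_getLast? hc) hcs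
  unfold pvName pyRemoveprefix
  rw [if_pos hsw]
  intro he
  apply hne
  have h3 : (PySem.Str.strip (String.ofList ((PySem.Str.strip r).toList.drop "## ".toList.length))).toList = [] := by
    rw [he]; rfl
  rw [PySem.Str.toList_strip, String.toList_ofList, PySem.Str.toList_strip] at h3
  have hdrop : (PySem.Chars.strip r.toList).drop "## ".toList.length = t := by
    rw [← ht]
    simp [show "## ".toList = ['#','#',' '] from rfl]
  rw [hdrop] at h3
  exact h3

-- B's reverse scan computes (reversed pending bucket, reversed sections)
theorem pvScanB (L : List String) :
    L.foldr (fun l st => pvStepB st l) ([], []) =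
      ((pvItems (L.takeWhile pvNH)).reverse, (pvSecs L).reverse) := by
  induction L with
  | nil => simp [pvSecs, pvItems]
  | cons l ls ih =>
    rw [List.foldr_cons, ih]
    by_cases h : pvH l = true
    · simp [pvStepB, h, pvSecs, pvNH, pvItems, pvSecs_dropWhile]
    · by_cases hi : pvI l = true
      · simp [pvStepB, h, hi, pvSecs, pvNH, pvItems]
      · simp [pvStepB, h, hi, pvSecs, pvNH, pvItems]

-- A's loop invariant, running with a current phase p that is a key of m
theorem pvFoldA (L : List String) (m : PySem.Dict String (List String)) (p : String)
    (hL : ∀ l ∈ L, pvH l = true → pvName l ≠ "")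
    (hp : p ≠ "") (hc : m.contains p = true) (hn : m.keys.Nodup) :
    (L.foldl pvStepA (m, p)).1 =
      pvInsAll (m.insert p (m.getD p [] ++ pvItems (L.takeWhile pvNH)))
        (pvSecs (L.dropWhile pvNH)) := by
  induction L generalizing m p with
  | nil =>
    simp only [List.foldl_nil, List.takeWhile_nil, List.dropWhile_nil, pvSecs, pvItems,
      List.filter_nil, List.map_nil, List.append_nil, pvInsAll, List.foldl_nil]
    rw [pv_insert_getD_self hn hc]
  | cons l ls ih =>
    by_cases h : pvH l = true
    · have hn' := hL l (List.mem_cons_self) h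
      rw [List.foldl_cons, show pvStepA (m, p) l = (m.insert (pvName l) [], pvName l) by
            simp [pvStepA, h]]
      rw [ih _ _ (fun x hx => hL x (List.mem_cons_of_mem _ hx)) hn'
            (PySem.Dict.contains_insert_self m (pvName l) []) (PySem.Dict.nodup_keys_insert m _ _ hn)]
      rw [PySem.Dict.getD_insert_self, pv_insert_insert]
      have hRHS : List.takeWhile pvNH (l :: ls) = [] := by simp [pvNH, h]
      have hRHS2 : List.dropWhile pvNH (l :: ls) = l :: ls := by simp [pvNH, h]
      rw [hRHS, hRHS2]
      simp only [pvItems, List.filter_nil, List.map_nil, List.append_nil, List.nil_append]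
      rw [pv_insert_getD_self hn hc]
      simp only [pvSecs, h, if_pos, pvInsAll, List.foldl_cons, pvItems]
    · by_cases hi : pvI l = true
      · have hb : (p != "") = true := by simpa [bne_iff_ne] using hp
        rw [List.foldl_cons, show pvStepA (m, p) l
              = (m.insert p (m.getD p [] ++ [pvItem l]), p) by
            simp [pvStepA, h, hi, hb, PySem.Dict.modify]]
        rw [ih _ _ (fun x hx => hL x (List.mem_cons_of_mem _ hx)) hp
              (PySem.Dict.contains_insert_self m p _) (PySem.Dict.nodup_keys_insert m _ _ hn)]
        rw [PySem.Dict.getD_insert_self, pv_insert_insert]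
        have h1 : List.takeWhile pvNH (l :: ls) = l :: List.takeWhile pvNH ls := by
          simp [pvNH, h]
        have h2 : List.dropWhile pvNH (l :: ls) = List.dropWhile pvNH ls := by
          simp [pvNH, h]
        rw [h1, h2]
        simp [pvItems, hi]
      · rw [List.foldl_cons, show pvStepA (m, p) l = (m, p) by simp [pvStepA, h, hi]]
        rw [ih _ _ (fun x hx => hL x (List.mem_cons_of_mem _ hx)) hp hc hn]
        have h1 : List.takeWhile pvNH (l :: ls) = l :: List.takeWhile pvNH ls := by
          simp [pvNH, h]
        have h2 : List.dropWhile pvNH (l :: ls) = List.dropWhile pvNH ls := by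
          simp [pvNH, h]
        rw [h1, h2]
        simp [pvItems, hi]

-- A's loop from the initial empty phase
theorem pvFoldA0 (L : List String) (m : PySem.Dict String (List String))
    (hL : ∀ l ∈ L, pvH l = true → pvName l ≠ "")
    (hn : m.keys.Nodup) :
    (L.foldl pvStepA (m, "")).1 = pvInsAll m (pvSecs L) := by
  induction L generalizing m with
  | nil => simp [pvSecs, pvInsAll]
  | cons l ls ih =>
    by_cases h : pvH l = true
    · have hn' := hL l (List.mem_cons_self) h
      rw [List.foldl_cons, show pvStepA (m, "") l = (m.insert (pvName l) [], pvName l) by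
            simp [pvStepA, h]]
      rw [pvFoldA ls _ _ (fun x hx => hL x (List.mem_cons_of_mem _ hx)) hn'
            (PySem.Dict.contains_insert_self m (pvName l) []) (PySem.Dict.nodup_keys_insert m _ _ hn)]
      rw [PySem.Dict.getD_insert_self, pv_insert_insert]
      simp only [pvSecs, h, if_pos, pvInsAll, List.foldl_cons, List.nil_append]
    · rw [List.foldl_cons, show pvStepA (m, "") l = (m, "") by simp [pvStepA, h]]
      rw [ih _ (fun x hx => hL x (List.mem_cons_of_mem _ hx)) hn]
      simp only [pvSecs, h, if_neg, Bool.false_eq_true, not_false_iff]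

-- ===== VERDICT (by name: the statement is the Claim_ definition above) =====
theorem parse_skill_delegation_map_spec : Claim_equal_parse_skill_delegation_map := by
  intro md _
  show parse_skill_delegation_map md = parse_skill_delegation_map_alt md
  unfold parse_skill_delegation_map parse_skill_delegation_map_alt
  have hL : ∀ l ∈ (PySem.Str.splitlines md).map PySem.Str.strip, pvH l = true → pvName l ≠ "" := by
    intro l hl
    obtain ⟨r, _, rfl⟩ := List.mem_map.1 hl
    exact pvName_ne_empty r
  -- A's fold over raw lines = the stripped-line fold
  have hA : (PySem.Str.splitlines md).foldl
      (fun st raw_line => pvStepA st (PySem.Str.strip raw_line)) (PySem.Dict.empty, "")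
      = ((PySem.Str.splitlines md).map PySem.Str.strip).foldl pvStepA (PySem.Dict.empty, "") :=
    (List.foldl_map).symm
  have hAn : (PySem.Dict.empty : PySem.Dict String (List String)).keys.Nodup := by
    rw [PySem.Dict.keys_empty]; exact List.nodup_nil
  -- B's reverse fold over raw lines = the foldr of pvStepB over the stripped lines
  have hB : (PySem.Str.splitlines md).reverse.foldl
      (fun st raw_line => pvStepB st (PySem.Str.strip raw_line)) (([], []) : List String × List (String × List String))
      = ((PySem.Str.splitlines md).map PySem.Str.strip).foldr (fun l st => pvStepB st l) ([], []) := by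
    rw [List.foldl_reverse, List.foldr_map]
  rw [hA, hB, pvScanB, pvFoldA0 _ _ hL hAn]
  simp [pvInsAll, List.reverse_reverse]
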